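-- pv_equiv track=rewrite | github.com/EgorVelikiy/Tests | №1/main.py | max_course_durations
-- ===== SOURCE A (Python) =====
-- def max_course_durations(courses, mentors, durations):
--     courses_list = []
--     for courses, mentor, dur in zip(courses, mentors, durations):
--         course_dict = {"title": courses, "mentors": mentor, "duration": dur}
--         courses_list.append(course_dict)
--     maxi = max(durations)
--     maxes = []
--     for index, values in enumerate(durations):
--         if values >= maxi:
--             maxes.append(index)
--     courses_max = []
--     for id in maxes:
--         courses_max.append(courses_list[id]["title"])
--     result = f'Самый длинный курс(ы): {", ".join(courses_max)} - {maxi} месяца(ев)'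
--     return result
-- ===== SOURCE B (Python) =====
-- def max_course_durations(courses, mentors, durations):
--     # Single streaming pass: running maximum + titles tied with it.
--     best = None
--     titles = []
--     for title, _mentor, dur in zip(courses, mentors, durations):
--         if best is None or dur > best:
--             best = dur
--             titles = [title]
--         elif dur == best:
--             titles.append(title)
--     if best is None:
--         raise ValueError("max() arg is an empty sequence")
--     return f'Самый длинный курс(ы): {", ".join(titles)} - {best} месяца(ев)'
-- ===== Notes on version B (the rewrite author's own statement) =====
-- stated objective: simpler
-- what changed: Replaced A's four passes (build dict list, max(), enumerate-scan for max indices, index back into the dict list) by one streaming pass over zip(courses, mentors, durations) that maintains the running maximum and the list of titles tied with it.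
import Mathlib
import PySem

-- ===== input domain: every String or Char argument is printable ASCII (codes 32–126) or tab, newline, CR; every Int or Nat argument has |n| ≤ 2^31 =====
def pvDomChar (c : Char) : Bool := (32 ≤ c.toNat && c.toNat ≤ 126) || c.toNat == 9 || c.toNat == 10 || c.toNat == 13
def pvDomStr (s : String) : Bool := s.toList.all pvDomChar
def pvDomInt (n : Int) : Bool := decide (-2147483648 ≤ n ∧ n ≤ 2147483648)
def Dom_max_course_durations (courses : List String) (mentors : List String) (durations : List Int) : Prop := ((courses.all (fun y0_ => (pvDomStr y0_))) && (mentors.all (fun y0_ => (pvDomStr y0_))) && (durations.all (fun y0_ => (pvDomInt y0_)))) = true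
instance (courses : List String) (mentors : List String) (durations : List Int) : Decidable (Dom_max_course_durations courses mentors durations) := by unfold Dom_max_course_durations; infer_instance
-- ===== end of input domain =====

-- B replaces A's four passes (dict list, max(), index scan, index-back lookup) with one
-- streaming pass keeping the running maximum and the titles tied with it (objective: simpler).


-- ===== PORT A =====
-- course_dict has the fixed keys "title"/"mentors"/"duration" with mixed value types;
-- ported as a record (exact: only the "title" field is ever read back).
structure PvCourse where
  title : String
  mentors : String
  duration : Int
deriving DecidableEq, Repr

def max_course_durations (courses : List String) (mentors : List String) (durations : List Int) : String :=
  let courses_list : List PvCourse :=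
    (courses.zip (mentors.zip durations)).foldl
      (fun acc t => acc ++ [{ title := t.1, mentors := t.2.1, duration := t.2.2 }]) []
  match PySem.List.max? durations (fun x => x) with
  | none => ""  -- max([]) raises ValueError; excluded by Pre_
  | some maxi =>
      let maxes : List Int :=
        (PySem.List.enumerate durations).foldl
          (fun acc iv => if maxi ≤ iv.2 then acc ++ [iv.1] else acc) []
      let courses_max : List String :=
        maxes.foldl (fun acc id =>
          -- courses_list[id]; none = IndexError, excluded by Pre_
          acc ++ [(PySem.List.pyGet? courses_list id).elim "" (fun cd => cd.title)]) []
      "Самый длинный курс(ы): " ++ PySem.Str.join ", " courses_max ++ " - " ++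
        PySem.Int.toStr maxi ++ " месяца(ев)"

-- ===== PORT B =====
-- one loop step of Source B: state = (best : Option Int, titles)
def pvStep (st : Option Int × List String) (t : String × String × Int) : Option Int × List String :=
  match st with
  | (none, _) => (some t.2.2, [t.1])
  | (some b, ts) =>
      if b < t.2.2 then (some t.2.2, [t.1])
      else if t.2.2 = b then (some b, ts ++ [t.1])
      else (some b, ts)

def max_course_durations_alt (courses : List String) (mentors : List String) (durations : List Int) : String :=
  match (courses.zip (mentors.zip durations)).foldl pvStep (none, []) with
  | (none, _) => ""  -- Source B raises ValueError here; excluded by Pre_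
  | (some best, titles) =>
      "Самый длинный курс(ы): " ++ PySem.Str.join ", " titles ++ " - " ++
        PySem.Int.toStr best ++ " месяца(ев)"

-- ===== PRECONDITION & SPEC =====
-- Pre_ holds exactly where A returns: durations nonempty (else max([]) raises ValueError) and
-- every position holding the maximal duration lies inside both courses and mentors (else the
-- lookup courses_list[id] raises IndexError, zip having truncated courses_list).
def Pre_max_course_durations (courses : List String) (mentors : List String) (durations : List Int) : Prop :=
  durations ≠ [] ∧
    ∀ i : Nat, (hi : i < durations.length) →
      (∀ j : Nat, (hj : j < durations.length) → durations[j] ≤ durations[i]) →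
      (i < courses.length ∧ i < mentors.length)

instance (courses : List String) (mentors : List String) (durations : List Int) : Decidable (Pre_max_course_durations courses mentors durations) := by unfold Pre_max_course_durations; infer_instance

def pvWitness_max_course_durations : List String × List String × List Int :=
  (["python", "lean"], ["anna", "boris"], [2, 5])

def Spec_max_course_durations (courses : List String) (mentors : List String) (durations : List Int) (out : String) : Prop := out = max_course_durations_alt courses mentors durations
instance (courses : List String) (mentors : List String) (durations : List Int) (out : String) : Decidable (Spec_max_course_durations courses mentors durations out) := by unfold Spec_max_course_durations; infer_instance

-- ===== CLAIM (what is proved, stated in full; the proofs are below) =====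
def Claim_equal_max_course_durations : Prop := ∀ (courses : List String) (mentors : List String) (durations : List Int), Dom_max_course_durations courses mentors durations → Pre_max_course_durations courses mentors durations → Spec_max_course_durations courses mentors durations (max_course_durations courses mentors durations)

-- ===== LEMMAS AND PROOFS =====

-- bounds for the running maximum, stated with the exact fold of the ports so that omega matches
lemma pvMaxInit (l : List (String × String × Int)) (b : Int) :
    b ≤ l.foldl (fun acc t => max acc t.2.2) b := by
  induction l generalizing b with
  | nil => simp
  | cons t rest ih => exact le_trans (le_max_left _ _) (ih (max b t.2.2))

lemma pvMaxMem (l : List (String × String × Int)) (b : Int) :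
    ∀ x ∈ l, x.2.2 ≤ l.foldl (fun acc t => max acc t.2.2) b := by
  induction l generalizing b with
  | nil => simp
  | cons t rest ih =>
    intro x hx
    rcases List.mem_cons.mp hx with h | h
    · subst h
      exact le_trans (le_max_right _ _) (pvMaxInit rest _)
    · exact ih (max b t.2.2) x h

lemma pvMaxLe (l : List (String × String × Int)) (b M : Int) (hb : b ≤ M)
    (h : ∀ x ∈ l, x.2.2 ≤ M) : l.foldl (fun acc t => max acc t.2.2) b ≤ M := by
  induction l generalizing b with
  | nil => exact hb
  | cons t rest ih =>
    exact ih (max b t.2.2) (max_le hb (h t (List.mem_cons_self)))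
      (fun x hx => h x (List.mem_cons_of_mem _ hx))

-- characterization of B's fold once the state is seeded
lemma pvFoldB (l : List (String × String × Int)) (b : Int) (ts : List String) :
    l.foldl pvStep (some b, ts)
      = (some (l.foldl (fun acc t => max acc t.2.2) b),
         (if b = l.foldl (fun acc t => max acc t.2.2) b then ts else [])
           ++ (l.filter (fun t => decide (t.2.2 = l.foldl (fun acc t => max acc t.2.2) b))).map
                (fun t => t.1)) := by
  induction l generalizing b ts with
  | nil => simp
  | cons t rest ih =>
    simp only [List.foldl_cons]
    rcases lt_trichotomy t.2.2 b with h | h | h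
    · have hmax : max b t.2.2 = b := max_eq_left h.le
      have hstep : pvStep (some b, ts) t = (some b, ts) := by
        simp [pvStep, if_neg (by omega : ¬ b < t.2.2), if_neg (by omega : ¬ t.2.2 = b)]
      rw [hstep]; simp only [hmax]; rw [ih b ts]
      have hle : b ≤ rest.foldl (fun acc t => max acc t.2.2) b := pvMaxInit rest b
      have hne : ¬ (t.2.2 = rest.foldl (fun acc t => max acc t.2.2) b) := by omega
      simp [hne]
    · have hmax : max b t.2.2 = b := by omega
      have hstep : pvStep (some b, ts) t = (some b, ts ++ [t.1]) := by
        simp [pvStep, if_neg (by omega : ¬ b < t.2.2), if_pos h]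
      rw [hstep]; simp only [hmax]; rw [ih b (ts ++ [t.1])]
      simp only [List.filter_cons]
      by_cases hb : b = rest.foldl (fun acc t => max acc t.2.2) b
      · simp [← hb, h]
      · simp [hb, (show ¬ (t.2.2 = rest.foldl (fun acc t => max acc t.2.2) b) by omega)]
    · have hmax : max b t.2.2 = t.2.2 := max_eq_right h.le
      have hstep : pvStep (some b, ts) t = (some t.2.2, [t.1]) := by
        simp [pvStep, if_pos h]
      rw [hstep]; simp only [hmax]; rw [ih t.2.2 [t.1]]
      have hle : t.2.2 ≤ rest.foldl (fun acc t => max acc t.2.2) t.2.2 := pvMaxInit rest t.2.2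
      have hbne : ¬ (b = rest.foldl (fun acc t => max acc t.2.2) t.2.2) := by omega
      simp only [List.filter_cons, if_neg hbne, List.nil_append]
      simp only [decide_eq_true_eq]
      by_cases ht : t.2.2 = rest.foldl (fun acc t => max acc t.2.2) t.2.2
      · rw [if_pos ht, if_pos ht]
        simp
      · rw [if_neg ht, if_neg ht]
        simp

-- the crux: A's enumerate-index pass over the full durations equals the positional
-- filter over the zipped triples, provided every maximal position is inside the zip
lemma pvKey (zl : List (String × String × Int)) (d : List Int) (M : Int)
    (hlen : zl.length ≤ d.length)
    (hval : ∀ k : Nat, (hk : k < zl.length) → zl[k].2.2 = d[k]'(by omega))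
    (hmax : ∀ u ∈ d, u ≤ M)
    (hin : ∀ k : Nat, (hk : k < d.length) → d[k] = M → k < zl.length) :
    ∀ (n s : Nat), d.length - s ≤ n →
    ((PySem.List.enumerate (d.drop s) s).filter (fun iv => decide (M ≤ iv.2))).map
        (fun iv => (PySem.List.pyGet?
            (zl.map (fun t => ({ title := t.1, mentors := t.2.1, duration := t.2.2 } : PvCourse))) iv.1).elim ""
            (fun cd => cd.title))
      = ((zl.drop s).filter (fun t => decide (t.2.2 = M))).map (fun t => t.1) := by
  intro n
  induction n with
  | zero =>
    intro s hs
    have hd : d.drop s = [] := List.drop_eq_nil_iff.mpr (by omega)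
    have hz : zl.drop s = [] := List.drop_eq_nil_iff.mpr (by omega)
    simp [hd, hz]
  | succ n ih =>
    intro s hs
    by_cases hlt : s < d.length
    · have hd : d.drop s = d[s] :: d.drop (s + 1) := List.drop_eq_getElem_cons hlt
      rw [hd, PySem.List.enumerate_cons]
      have htail := ih (s + 1) (by omega)
      have hcast : ((s : Int) + 1) = ((s + 1 : Nat) : Int) := by push_cast; ring
      have hdsle : d[s] ≤ M := hmax _ (List.getElem_mem hlt)
      by_cases hM : d[s] = M
      · have hszl : s < zl.length := hin s hlt hM
        have hz : zl.drop s = zl[s] :: zl.drop (s + 1) := List.drop_eq_getElem_cons hszl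
        have hzv : zl[s].2.2 = d[s] := hval s hszl
        have hget : PySem.List.pyGet?
            (zl.map (fun t => ({ title := t.1, mentors := t.2.1, duration := t.2.2 } : PvCourse))) (s : Int)
            = some { title := zl[s].1, mentors := zl[s].2.1, duration := zl[s].2.2 } := by
          rw [PySem.List.pyGet?_natCast]
          rw [List.getElem?_eq_getElem (by simpa using hszl)]
          simp
        have hc1 : (decide (M ≤ (s, d[s]'hlt).2) = true) := by simp; omega
        have hc2 : (decide ((zl[s]'hszl).2.2 = M) = true) := by simp [hzv, hM]
        rw [hz]
        simp only [List.filter_cons, hc1, if_true, hc2, List.map_cons]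
        rw [hcast, htail, hget]
        simp
      · have hc1 : (decide (M ≤ (s, d[s]'hlt).2) = true) = False := by simp; omega
        simp only [List.filter_cons, hc1, if_false]
        rw [hcast, htail]
        by_cases hszl : s < zl.length
        · have hz : zl.drop s = zl[s] :: zl.drop (s + 1) := List.drop_eq_getElem_cons hszl
          have hzv : zl[s].2.2 = d[s] := hval s hszl
          have hc2 : (decide ((zl[s]'hszl).2.2 = M) = true) = False := by simp [hzv, hM]
          rw [hz]
          simp only [List.filter_cons, hc2, if_false]
        · rw [List.drop_eq_nil_iff.mpr (by omega), List.drop_eq_nil_iff.mpr (by omega)]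
    · have hd : d.drop s = [] := List.drop_eq_nil_iff.mpr (by omega)
      have hz : zl.drop s = [] := List.drop_eq_nil_iff.mpr (by omega)
      simp [hd, hz]

-- ===== VERDICT (by name: the statement is the Claim_ definition above) =====
theorem max_course_durations_spec : Claim_equal_max_course_durations := by
  intro courses mentors durations _hdom hpre
  obtain ⟨hne, hidx⟩ := hpre
  unfold Spec_max_course_durations max_course_durations max_course_durations_alt
  set zl := courses.zip (mentors.zip durations) with hzl
  obtain ⟨M, hM⟩ : ∃ M, PySem.List.max? durations (fun x => x) = some M := by
    cases h : PySem.List.max? durations (fun x => x) with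
    | none => exact absurd ((PySem.List.max?_eq_none_iff _ _).mp h) hne
    | some M => exact ⟨M, rfl⟩
  have hmax : ∀ u ∈ durations, u ≤ M := by
    intro u hu; exact PySem.List.max?_isMax hM u hu
  have hMmem : M ∈ durations := PySem.List.max?_mem hM
  obtain ⟨i, hi, hdi⟩ := List.mem_iff_getElem.mp hMmem
  have hzlen : zl.length = min courses.length (min mentors.length durations.length) := by
    simp [hzl]
  have hlen : zl.length ≤ durations.length := by omega
  have hval : ∀ k : Nat, (hk : k < zl.length) → zl[k].2.2 = durations[k]'(by omega) := by
    intro k hk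
    simp [hzl, List.getElem_zip]
  have hin : ∀ k : Nat, (hk : k < durations.length) → durations[k] = M → k < zl.length := by
    intro k hk hkM
    have := hidx k hk (fun j hj => by rw [hkM]; exact hmax _ (List.getElem_mem hj))
    omega
  have hizl : i < zl.length := hin i hi hdi
  rw [hM]
  have hfold := PySem.List.foldl_append_if (fun iv : Int × Int => decide (M ≤ iv.2))
    (fun iv : Int × Int => iv.1) (PySem.List.enumerate durations) []
  simp only [decide_eq_true_eq] at hfold
  simp only [hfold, PySem.List.foldl_append_singleton_eq_map, List.nil_append, List.map_map,
    Function.comp_def]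
  have hA := pvKey zl durations M hlen hval hmax hin durations.length 0 (by omega)
  simp only [List.drop_zero, Nat.cast_zero] at hA
  obtain ⟨t, rest, hcons⟩ : ∃ t rest, zl = t :: rest := by
    cases hzc : zl with
    | nil => rw [hzc] at hizl; simp at hizl
    | cons t rest => exact ⟨t, rest, rfl⟩
  have hmem22 : ∀ x ∈ zl, x.2.2 ∈ durations := by
    intro x hx
    exact (List.of_mem_zip ((List.of_mem_zip hx).2)).2
  have hBmax : rest.foldl (fun acc t => max acc t.2.2) t.2.2 = M := by
    have hub : rest.foldl (fun acc t => max acc t.2.2) t.2.2 ≤ M :=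
      pvMaxLe rest t.2.2 M (hmax _ (hmem22 t (by simp [hcons])))
        (fun x hx => hmax _ (hmem22 x (by simp [hcons, hx])))
    obtain ⟨x, hxmem, hx22⟩ : ∃ x ∈ zl, x.2.2 = M :=
      ⟨zl[i], List.getElem_mem hizl, by rw [hval i hizl, hdi]⟩
    have hxmem' : x ∈ t :: rest := hcons ▸ hxmem
    have hlb : M ≤ rest.foldl (fun acc t => max acc t.2.2) t.2.2 := by
      rcases List.mem_cons.mp hxmem' with h | h
      · rw [← hx22, h]
        exact pvMaxInit rest t.2.2
      · rw [← hx22]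
        exact pvMaxMem rest t.2.2 _ h
    omega
  rw [hcons, List.foldl_cons]
  have hseed : pvStep (none, []) t = (some t.2.2, [t.1]) := rfl
  rw [hseed, pvFoldB rest t.2.2 [t.1], hBmax]
  rw [hcons] at hA
  simp only [List.filter_cons] at hA
  by_cases htM : t.2.2 = M
  · have hc : (decide (t.2.2 = M) = true) = True := by simp [htM]
    simp only [hc, if_true] at hA
    rw [hA, if_pos htM]
    simp
  · have hc : (decide (t.2.2 = M) = true) = False := by simp [htM]
    simp only [hc, if_false] at hA
    rw [hA, if_neg htM]
    simp
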